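-- pv_equiv track=rewrite | github.com/TheNDCC/AdventCfCode | 2025/dia8/dia8b.py | part1_multiply_top3_after_k_edges
-- ===== SOURCE A (Python) =====
-- class DSU:
--     def __init__(self, n):
--         self.p = list(range(n))
--         self.sz = [1]*n
--         self.components = n
--
--     def find(self, a):
--         while self.p[a] != a:
--             self.p[a] = self.p[self.p[a]]
--             a = self.p[a]
--         return a
--
--     def union(self, a, b):
--         ra = self.find(a)
--         rb = self.find(b)
--         if ra == rb:
--             return False
--         # union by size
--         if self.sz[ra] < self.sz[rb]:
--             ra, rb = rb, ra
--         self.p[rb] = ra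
--         self.sz[ra] += self.sz[rb]
--         self.components -= 1
--         return True
--
--     def comp_size(self, a):
--         return self.sz[self.find(a)]
--
-- def part1_multiply_top3_after_k_edges(pts, edges_sorted, k=1000):
--     n = len(pts)
--     dsu = DSU(n)
--     # tomar primeras k edges (o menos si no hay suficientes)
--     upto = min(k, len(edges_sorted))
--     for idx in range(upto):
--         _, i, j = edges_sorted[idx]
--         dsu.union(i, j)
--     # calcular tamaños por representante
--     sizes = {}
--     for i in range(n):
--         r = dsu.find(i)
--         sizes[r] = sizes.get(r, 0) + 1
--     sizes_list = sorted(sizes.values(), reverse=True)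
--     # multiplicar las tres mayores (si menos de 3, multiplicar las existentes)
--     top3 = sizes_list[:3]
--     # si hay menos de 3 componentes, completar con 1 para que la multiplicación sea correcta
--     while len(top3) < 3:
--         top3.append(1)
--     return top3[0] * top3[1] * top3[2]
-- ===== SOURCE B (Python) =====
-- def part1_multiply_top3_after_k_edges(pts, edges_sorted, k=1000):
--     n = len(pts)
--     labels = list(range(n))
--     upto = min(k, len(edges_sorted))
--     for idx in range(upto):
--         _, i, j = edges_sorted[idx]
--         li, lj = labels[i], labels[j]
--         if li != lj:
--             labels = [li if l == lj else l for l in labels]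
--     counts = {}
--     for l in labels:
--         counts[l] = counts.get(l, 0) + 1
--     top = sorted(counts.values(), reverse=True)[:3]
--     top += [1] * (3 - len(top))
--     return top[0] * top[1] * top[2]
-- ===== Notes on version B (the rewrite author's own statement) =====
-- stated objective: simpler
-- what changed: Replaced the union-find (parent array with path halving, union by size, then a find-per-node counting pass) by direct label relabelling: keep one label per node and, for each of the first min(k,len(edges)) edges, rewrite every occurrence of one endpoint's label to the other's, then count labels; no parent pointers, path compression or union-by-size remain.
import Mathlib
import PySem

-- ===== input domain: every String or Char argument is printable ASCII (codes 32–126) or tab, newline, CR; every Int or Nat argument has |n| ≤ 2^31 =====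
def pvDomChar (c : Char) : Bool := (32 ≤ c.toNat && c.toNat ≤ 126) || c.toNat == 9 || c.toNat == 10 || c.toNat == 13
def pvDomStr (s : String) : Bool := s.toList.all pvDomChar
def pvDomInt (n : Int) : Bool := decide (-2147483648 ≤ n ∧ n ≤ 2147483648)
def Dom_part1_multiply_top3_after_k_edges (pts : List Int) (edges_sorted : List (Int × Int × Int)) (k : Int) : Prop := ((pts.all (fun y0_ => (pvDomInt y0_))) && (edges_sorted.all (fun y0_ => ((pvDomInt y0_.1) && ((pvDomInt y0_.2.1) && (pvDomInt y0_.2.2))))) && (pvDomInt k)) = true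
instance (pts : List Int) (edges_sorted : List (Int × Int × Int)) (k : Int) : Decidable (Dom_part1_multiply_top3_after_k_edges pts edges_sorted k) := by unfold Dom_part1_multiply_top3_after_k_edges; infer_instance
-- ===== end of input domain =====

-- B replaces A's union-find (path halving + union by size) by direct label relabelling
-- per edge; objective: simpler (no parent forest, no compression), value-equal on Pre_.

-- ===== PORT A =====
-- DSU.find: `while p[a] != a: p[a] = p[p[a]]; a = p[a]`.  The Python while-loop is ported
-- with explicit fuel; the main function passes fuel n+len(edges)+1, proved sufficient on Pre_.
def pvFind : Nat → List Int → Int → (List Int × Int)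
  | 0, p, a => (p, a)
  | f+1, p, a =>
    let pa := PySem.List.pyGetD p a 0
    if pa = a then (p, a)
    else
      let g := PySem.List.pyGetD p pa 0
      pvFind f (PySem.List.pySetD p a g) g

-- DSU.union (state p, sz, components)
def pvUnion (F : Nat) (p sz : List Int) (c : Int) (a b : Int) : List Int × List Int × Int :=
  let q1 := pvFind F p a
  let q2 := pvFind F q1.1 b
  let ra := q1.2
  let rb := q2.2
  if ra = rb then (q2.1, sz, c)
  else
    let rr := if PySem.List.pyGetD sz ra 0 < PySem.List.pyGetD sz rb 0 then (rb, ra) else (ra, rb)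
    (PySem.List.pySetD q2.1 rr.2 rr.1,
     PySem.List.pySetD sz rr.1 (PySem.List.pyGetD sz rr.1 0 + PySem.List.pyGetD sz rr.2 0),
     c - 1)

def pvStepA (edges_sorted : List (Int × Int × Int)) (F : Nat)
    (st : List Int × List Int × Int) (idx : Int) : List Int × List Int × Int :=
  let e := PySem.List.pyGetD edges_sorted idx (0, 0, 0)
  pvUnion F st.1 st.2.1 st.2.2 e.2.1 e.2.2

def pvStepSize (F : Nat) (st : List Int × PySem.Dict Int Int) (i : Int) :
    List Int × PySem.Dict Int Int :=
  let q := pvFind F st.1 i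
  (q.1, st.2.insert q.2 (st.2.getD q.2 0 + 1))

-- `while len(top3) < 3: top3.append(1)` — at most 3 iterations, ported with fuel 3
def pvPad3 : Nat → List Int → List Int
  | 0, t => t
  | f+1, t => if t.length < 3 then pvPad3 f (t ++ [1]) else t

def part1_multiply_top3_after_k_edges (pts : List Int) (edges_sorted : List (Int × Int × Int)) (k : Int) : Int :=
  let n := pts.length
  let F := n + edges_sorted.length + 1
  let p0 := PySem.List.pyRange 0 n 1
  let sz0 := PySem.List.pyRepeat [(1 : Int)] n
  let upto := min k (edges_sorted.length : Int)
  let st := (PySem.List.pyRange 0 upto 1).foldl (pvStepA edges_sorted F) (p0, sz0, (n : Int))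
  let fin := (PySem.List.pyRange 0 (n : Int) 1).foldl (pvStepSize F) (st.1, PySem.Dict.empty)
  let sizes_list := PySem.List.sorted fin.2.values (fun x => x) true
  let top3 := PySem.List.slice sizes_list none (some 3)
  let top3 := pvPad3 3 top3
  PySem.List.pyGetD top3 0 0 * PySem.List.pyGetD top3 1 0 * PySem.List.pyGetD top3 2 0

-- ===== PORT B =====
def pvStepB (edges_sorted : List (Int × Int × Int)) (L : List Int) (idx : Int) : List Int :=
  let e := PySem.List.pyGetD edges_sorted idx (0, 0, 0)
  let li := PySem.List.pyGetD L e.2.1 0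
  let lj := PySem.List.pyGetD L e.2.2 0
  if li ≠ lj then L.map (fun l => if l = lj then li else l) else L

def part1_multiply_top3_after_k_edges_alt (pts : List Int) (edges_sorted : List (Int × Int × Int)) (k : Int) : Int :=
  let n := pts.length
  let upto := min k (edges_sorted.length : Int)
  let L := (PySem.List.pyRange 0 upto 1).foldl (pvStepB edges_sorted) (PySem.List.pyRange 0 n 1)
  let counts := L.foldl (fun (d : PySem.Dict Int Int) l => d.insert l (d.getD l 0 + 1)) PySem.Dict.empty
  let top := PySem.List.slice (PySem.List.sorted counts.values (fun x => x) true) none (some 3)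
  let top := top ++ PySem.List.pyRepeat [(1 : Int)] (3 - (top.length : Int))
  PySem.List.pyGetD top 0 0 * PySem.List.pyGetD top 1 0 * PySem.List.pyGetD top 2 0

-- ===== PRECONDITION & SPEC =====
-- Pre_ excludes exactly the inputs where A raises IndexError: some of the first
-- min(k, len(edges_sorted)) edges has an endpoint outside [-n, n) (n = len(pts)).
def Pre_part1_multiply_top3_after_k_edges (pts : List Int) (edges_sorted : List (Int × Int × Int)) (k : Int) : Prop :=
  ∀ e ∈ edges_sorted.take (min k (edges_sorted.length : Int)).toNat,
    -(pts.length : Int) ≤ e.2.1 ∧ e.2.1 < (pts.length : Int) ∧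
    -(pts.length : Int) ≤ e.2.2 ∧ e.2.2 < (pts.length : Int)
instance (pts : List Int) (edges_sorted : List (Int × Int × Int)) (k : Int) : Decidable (Pre_part1_multiply_top3_after_k_edges pts edges_sorted k) := by unfold Pre_part1_multiply_top3_after_k_edges; infer_instance

def pvWitness_part1_multiply_top3_after_k_edges : List Int × (List (Int × Int × Int)) × Int :=
  ([10, 20, 30, 40], [(5, 0, 1), (7, 1, 2), (9, 0, 2)], 2)

def Spec_part1_multiply_top3_after_k_edges (pts : List Int) (edges_sorted : List (Int × Int × Int)) (k : Int) (out : Int) : Prop := out = part1_multiply_top3_after_k_edges_alt pts edges_sorted k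
instance (pts : List Int) (edges_sorted : List (Int × Int × Int)) (k : Int) (out : Int) : Decidable (Spec_part1_multiply_top3_after_k_edges pts edges_sorted k out) := by unfold Spec_part1_multiply_top3_after_k_edges; infer_instance

-- ===== CLAIM (what is proved, stated in full; the proofs are below) =====
def Claim_equal_part1_multiply_top3_after_k_edges : Prop := ∀ (pts : List Int) (edges_sorted : List (Int × Int × Int)) (k : Int), Dom_part1_multiply_top3_after_k_edges pts edges_sorted k → Pre_part1_multiply_top3_after_k_edges pts edges_sorted k → Spec_part1_multiply_top3_after_k_edges pts edges_sorted k (part1_multiply_top3_after_k_edges pts edges_sorted k)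

-- ===== LEMMAS AND PROOFS =====


-- roots: b reaches root r within g parent steps
def pvRootsTo (p : List Int) : Nat → Int → Int → Prop
  | 0, b, r => PySem.List.pyGetD p b 0 = b ∧ b = r
  | g+1, b, r => if PySem.List.pyGetD p b 0 = b then b = r else pvRootsTo p g (PySem.List.pyGetD p b 0) r

def pvBounds (n : Nat) (p : List Int) : Prop :=
  p.length = n ∧ ∀ i : Int, 0 ≤ i → i < (n : Int) →
    0 ≤ PySem.List.pyGetD p i 0 ∧ PySem.List.pyGetD p i 0 < (n : Int)

def pvReach (n : Nat) (p : List Int) (G : Nat) : Prop :=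
  ∀ i : Int, 0 ≤ i → i < (n : Int) → ∃ r, pvRootsTo p G i r

def pvRel (n : Nat) (p : List Int) (L : List Int) : Prop :=
  ∀ i j ri rj gi gj, 0 ≤ i → i < (n : Int) → 0 ≤ j → j < (n : Int) →
    pvRootsTo p gi i ri → pvRootsTo p gj j rj →
    (ri = rj ↔ PySem.List.pyGetD L i 0 = PySem.List.pyGetD L j 0)

lemma pvGetD_neg_shift (xs : List Int) (i : Int) (d : Int)
    (h1 : -(xs.length : Int) ≤ i) (h2 : i < 0) :
    PySem.List.pyGetD xs i d = PySem.List.pyGetD xs (i + xs.length) d := by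
  simp only [PySem.List.pyGetD, PySem.List.pyGet?, PySem.List.pyIdx?]
  have : ¬ (0 ≤ i) := by omega
  have h3 : 0 ≤ i + xs.length := by omega
  have h4 : i + (xs.length : Int) < (xs.length : Int) := by omega
  simp only [this, if_false, if_pos h1, if_pos h3, if_pos h4]
  have he : xs.length - (-i).toNat = (i + xs.length).toNat := by omega
  rw [he]

lemma pvSetD_neg_shift (xs : List Int) (i : Int) (v : Int)
    (h1 : -(xs.length : Int) ≤ i) (h2 : i < 0) :
    PySem.List.pySetD xs i v = PySem.List.pySetD xs (i + xs.length) v := by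
  simp only [PySem.List.pySetD, PySem.List.pySet?, PySem.List.pyIdx?]
  have : ¬ (0 ≤ i) := by omega
  have h3 : 0 ≤ i + xs.length := by omega
  have h4 : i + (xs.length : Int) < (xs.length : Int) := by omega
  simp only [this, if_false, if_pos h1, if_pos h3, if_pos h4]
  have he : xs.length - (-i).toNat = (i + xs.length).toNat := by omega
  rw [he]

lemma pvSetD_length (xs : List Int) (i v : Int) :
    (PySem.List.pySetD xs i v).length = xs.length := by
  simp only [PySem.List.pySetD, PySem.List.pySet?]
  cases h : PySem.List.pyIdx? xs.length i <;> simp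

lemma pvGetD_setD (xs : List Int) (i v m d : Int) (h1 : 0 ≤ i) (h2 : i < (xs.length : Int))
    (hm0 : 0 ≤ m) :
    PySem.List.pyGetD (PySem.List.pySetD xs i v) m d = if m = i then v else PySem.List.pyGetD xs m d := by
  have hlt : i.toNat < xs.length := by omega
  rw [PySem.List.pySetD_of_nonneg xs v h1]
  by_cases hmlen : m < (xs.length : Int)
  · have hml : m.toNat < xs.length := by omega
    rw [PySem.List.pyGetD_eq_getElem _ _ hm0 (by simpa using hmlen),
        PySem.List.pyGetD_eq_getElem _ _ hm0 hmlen]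
    rw [List.getElem_set]
    by_cases he : m = i
    · simp [he]
    · have : ¬ (i.toNat = m.toNat) := by omega
      simp [this, he]
  · have hne : m ≠ i := by omega
    simp only [PySem.List.pyGetD, PySem.List.pyGet?, PySem.List.pyIdx?, List.length_set, hne, if_false]
    simp [hm0, (by simpa using hmlen : ¬ m < ((xs.length:Int)))]

lemma pvSet_getD_same (xs : List Int) (i v : Int) (h1 : 0 ≤ i) (h2 : i < (xs.length : Int))
    (hv : PySem.List.pyGetD xs i 0 = v) :
    PySem.List.pySetD xs i v = xs := by
  have hlt : i.toNat < xs.length := by omega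
  rw [PySem.List.pySetD_of_nonneg xs _ h1, ← hv, PySem.List.pyGetD_eq_getElem _ _ h1 h2]
  exact List.set_getElem_self hlt


lemma pvRootsTo_mono {p : List Int} : ∀ {g g' : Nat} {b r : Int},
    pvRootsTo p g b r → g ≤ g' → pvRootsTo p g' b r := by
  intro g
  induction g with
  | zero =>
    intro g' b r h _
    obtain ⟨hb, rfl⟩ := h
    cases g' with
    | zero => exact ⟨hb, rfl⟩
    | succ g'' => simp [pvRootsTo, hb]
  | succ g ih =>
    intro g' b r h hle
    cases g' with
    | zero => omega
    | succ g'' =>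
      simp only [pvRootsTo] at h ⊢
      by_cases hb : PySem.List.pyGetD p b 0 = b
      · simpa [hb] using (by simpa [hb] using h : b = r)
      · simp only [hb, if_false] at h ⊢
        exact ih h (by omega)

lemma pvRootsTo_root {p : List Int} {c : Int} (h : PySem.List.pyGetD p c 0 = c) (g : Nat) :
    pvRootsTo p g c c := by
  cases g with
  | zero => exact ⟨h, rfl⟩
  | succ g => simp [pvRootsTo, h]

lemma pvRootsTo_unique {p : List Int} : ∀ {g g' : Nat} {b r r' : Int},
    pvRootsTo p g b r → pvRootsTo p g' b r' → r = r' := by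
  intro g
  induction g with
  | zero =>
    intro g' b r r' h h'
    obtain ⟨hb, rfl⟩ := h
    cases g' with
    | zero => exact h'.2
    | succ g'' => simpa [pvRootsTo, hb] using h'
  | succ g ih =>
    intro g' b r r' h h'
    simp only [pvRootsTo] at h
    by_cases hb : PySem.List.pyGetD p b 0 = b
    · simp only [hb, if_true] at h
      subst h
      cases g' with
      | zero => exact h'.2
      | succ g'' => simpa [pvRootsTo, hb] using h'
    · simp only [hb, if_false] at h
      cases g' with
      | zero => exact absurd h'.1 hb
      | succ g'' =>
        simp only [pvRootsTo, hb, if_false] at h'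
        exact ih h h'

lemma pvRootsTo_det {p : List Int} {g : Nat} {a r : Int}
    (ha : PySem.List.pyGetD p a 0 = a) (h : pvRootsTo p g a r) : r = a :=
  (pvRootsTo_unique h (pvRootsTo_root ha 0)).symm ▸ rfl

lemma pvRootsTo_bounds {n : Nat} {p : List Int} (hB : pvBounds n p) :
    ∀ {g : Nat} {b r : Int}, 0 ≤ b → b < (n : Int) → pvRootsTo p g b r →
      0 ≤ r ∧ r < (n : Int) ∧ PySem.List.pyGetD p r 0 = r := by
  intro g
  induction g with
  | zero =>
    intro b r hb1 hb2 h
    obtain ⟨hb, rfl⟩ := h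
    exact ⟨hb1, hb2, hb⟩
  | succ g ih =>
    intro b r hb1 hb2 h
    simp only [pvRootsTo] at h
    by_cases hb : PySem.List.pyGetD p b 0 = b
    · simp only [hb, if_true] at h; subst h; exact ⟨hb1, hb2, hb⟩
    · simp only [hb, if_false] at h
      obtain ⟨h1, h2⟩ := hB.2 b hb1 hb2
      exact ih h1 h2 h

lemma pvNoCycle {p : List Int} {b pa : Int}
    (h1 : PySem.List.pyGetD p b 0 = pa) (h2 : PySem.List.pyGetD p pa 0 = b) (hne : pa ≠ b) :
    ∀ {g : Nat} {r : Int}, ¬ pvRootsTo p g b r := by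
  intro g
  induction g generalizing b pa with
  | zero =>
    intro r h
    exact hne (by rw [← h1, h.1])
  | succ g ih =>
    intro r h
    simp only [pvRootsTo] at h
    have hb : ¬ (PySem.List.pyGetD p b 0 = b) := by rw [h1]; exact hne
    rw [h1, if_neg hne] at h
    exact ih h2 h1 (fun he => hne he.symm) h


lemma pvBounds_setD {n : Nat} {p : List Int} {i v : Int} (hB : pvBounds n p)
    (hi0 : 0 ≤ i) (hin : i < (n : Int)) (hv0 : 0 ≤ v) (hvn : v < (n : Int)) :
    pvBounds n (PySem.List.pySetD p i v) := by
  have hlen : (p.length : Int) = (n : Int) := by exact_mod_cast congrArg Nat.cast hB.1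
  refine ⟨by rw [pvSetD_length]; exact hB.1, ?_⟩
  intro x hx0 hxn
  rw [pvGetD_setD p i v x 0 hi0 (by omega) hx0]
  by_cases hxi : x = i
  · simp [hxi, hv0, hvn]
  · simp only [hxi, if_false]
    exact hB.2 x hx0 hxn

lemma pvFind_root {p : List Int} {c : Int} (h : PySem.List.pyGetD p c 0 = c) (f : Nat) :
    pvFind f p c = (p, c) := by
  cases f with
  | zero => rfl
  | succ f => simp [pvFind, h]

lemma pvHalvePres {n : Nat} {p : List Int} {a : Int} (hB : pvBounds n p)
    (ha0 : 0 ≤ a) (han : a < (n : Int)) (hpa : PySem.List.pyGetD p a 0 ≠ a) :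
    ∀ g' : Nat, ∀ b r' : Int, 0 ≤ b → b < (n : Int) → pvRootsTo p g' b r' →
      pvRootsTo (PySem.List.pySetD p a (PySem.List.pyGetD p (PySem.List.pyGetD p a 0) 0)) g' b r' := by
  have hlen : (p.length : Int) = (n : Int) := by exact_mod_cast congrArg Nat.cast hB.1
  have hget : ∀ x : Int, 0 ≤ x →
      PySem.List.pyGetD (PySem.List.pySetD p a (PySem.List.pyGetD p (PySem.List.pyGetD p a 0) 0)) x 0
        = if x = a then PySem.List.pyGetD p (PySem.List.pyGetD p a 0) 0
          else PySem.List.pyGetD p x 0 := by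
    intro x hx
    exact pvGetD_setD p a _ x 0 ha0 (by omega) hx
  have hpabd : 0 ≤ PySem.List.pyGetD p a 0 ∧ PySem.List.pyGetD p a 0 < (n : Int) :=
    hB.2 a ha0 han
  intro g'
  induction g' using Nat.strong_induction_on with
  | _ g' ih =>
    intro b r' hb0 hbn hroot
    by_cases hbroot : PySem.List.pyGetD p b 0 = b
    · have hr : r' = b := pvRootsTo_det hbroot hroot
      have hba : b ≠ a := fun he => hpa (by rw [← he]; exact hbroot)
      have hb' : PySem.List.pyGetD (PySem.List.pySetD p a
          (PySem.List.pyGetD p (PySem.List.pyGetD p a 0) 0)) b 0 = b := by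
        rw [hget b hb0, if_neg hba]; exact hbroot
      rw [hr]; exact pvRootsTo_root hb' g'
    · obtain ⟨g'', rfl⟩ : ∃ g'', g' = g'' + 1 := by
        cases g' with
        | zero => exact absurd hroot.1 hbroot
        | succ g'' => exact ⟨g'', rfl⟩
      simp only [pvRootsTo, hbroot, if_false] at hroot
      -- hroot : pvRootsTo p g'' (pyGetD p b 0) r'
      by_cases hba : b = a
      · rw [hba] at hroot hbroot ⊢
        -- the changed entry
        by_cases hparoot : PySem.List.pyGetD p (PySem.List.pyGetD p a 0) 0 = PySem.List.pyGetD p a 0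
        · have hr : r' = PySem.List.pyGetD p a 0 := pvRootsTo_det hparoot hroot
          have hb' : PySem.List.pyGetD (PySem.List.pySetD p a
              (PySem.List.pyGetD p (PySem.List.pyGetD p a 0) 0)) a 0 = PySem.List.pyGetD p a 0 := by
            rw [hget a ha0, if_pos rfl, hparoot]
          have hpar' : PySem.List.pyGetD (PySem.List.pySetD p a
              (PySem.List.pyGetD p (PySem.List.pyGetD p a 0) 0)) (PySem.List.pyGetD p a 0) 0
              = PySem.List.pyGetD p a 0 := by
            rw [hget _ hpabd.1, if_neg hpa, hparoot]
          simp only [pvRootsTo, hb', hpa, if_false]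
          rw [hr]
          exact pvRootsTo_mono (pvRootsTo_root hpar' 0) (by omega)
        · obtain ⟨g3, rfl⟩ : ∃ g3, g'' = g3 + 1 := by
            cases g'' with
            | zero => exact absurd hroot.1 hparoot
            | succ g3 => exact ⟨g3, rfl⟩
          simp only [pvRootsTo, hparoot, if_false] at hroot
          -- hroot : pvRootsTo p g3 (pyGetD p (pyGetD p a 0) 0) r'
          by_cases hgra : PySem.List.pyGetD p (PySem.List.pyGetD p a 0) 0 = a
          · exfalso
            rw [hgra] at hroot
            exact pvNoCycle rfl hgra hpa hroot
          · have h1 : PySem.List.pyGetD (PySem.List.pySetD p a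
                (PySem.List.pyGetD p (PySem.List.pyGetD p a 0) 0)) a 0
                = PySem.List.pyGetD p (PySem.List.pyGetD p a 0) 0 := by
              rw [hget a ha0, if_pos rfl]
            have hgrbd := hB.2 _ hpabd.1 hpabd.2
            have := ih g3 (by omega : g3 < g3 + 1 + 1) _ r' hgrbd.1 hgrbd.2 hroot
            simp only [pvRootsTo, h1, hgra, if_false]
            exact pvRootsTo_mono this (Nat.le_succ g3)
      · -- unchanged entry
        have h1 : PySem.List.pyGetD (PySem.List.pySetD p a
            (PySem.List.pyGetD p (PySem.List.pyGetD p a 0) 0)) b 0 = PySem.List.pyGetD p b 0 := by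
          rw [hget b hb0, if_neg hba]
        have hpbbd := hB.2 b hb0 hbn
        have := ih g'' (by omega) _ r' hpbbd.1 hpbbd.2 hroot
        simp only [pvRootsTo, h1, hbroot, if_false]
        exact this

lemma pvFind_spec {n : Nat} : ∀ g : Nat, ∀ (f : Nat) (p : List Int) (a r : Int),
    pvBounds n p → 0 ≤ a → a < (n : Int) → pvRootsTo p g a r → g < f →
    ∃ p', pvFind f p a = (p', r) ∧ pvBounds n p' ∧
      (∀ g' b r', 0 ≤ b → b < (n : Int) → pvRootsTo p g' b r' → pvRootsTo p' g' b r') := by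
  intro g
  induction g using Nat.strong_induction_on with
  | _ g ih =>
    intro f p a r hB ha0 han hroot hgf
    have hlen : (p.length : Int) = (n : Int) := by exact_mod_cast congrArg Nat.cast hB.1
    obtain ⟨f, rfl⟩ : ∃ f', f = f' + 1 := ⟨f - 1, by omega⟩
    by_cases hpa : PySem.List.pyGetD p a 0 = a
    · have hr : r = a := pvRootsTo_det hpa hroot
      refine ⟨p, ?_, hB, fun _ _ _ _ _ h => h⟩
      rw [hr]
      exact pvFind_root hpa _
    · obtain ⟨g1, rfl⟩ : ∃ g1, g = g1 + 1 := by
        cases g with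
        | zero => exact absurd hroot.1 hpa
        | succ g1 => exact ⟨g1, rfl⟩
      simp only [pvRootsTo, hpa, if_false] at hroot
      -- hroot : pvRootsTo p g1 (pyGetD p a 0) r
      have hpabd := hB.2 a ha0 han
      by_cases hparoot : PySem.List.pyGetD p (PySem.List.pyGetD p a 0) 0 = PySem.List.pyGetD p a 0
      · have hr : r = PySem.List.pyGetD p a 0 := pvRootsTo_det hparoot hroot
        have hset : PySem.List.pySetD p a
            (PySem.List.pyGetD p (PySem.List.pyGetD p a 0) 0) = p := by
          rw [hparoot]
          exact pvSet_getD_same p a _ ha0 (by omega) rfl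
        refine ⟨p, ?_, hB, fun _ _ _ _ _ h => h⟩
        simp only [pvFind, hpa, if_false]
        rw [hset, hparoot, pvFind_root hparoot, hr]
      · obtain ⟨g2, rfl⟩ : ∃ g2, g1 = g2 + 1 := by
          cases g1 with
          | zero => exact absurd hroot.1 hparoot
          | succ g2 => exact ⟨g2, rfl⟩
        simp only [pvRootsTo, hparoot, if_false] at hroot
        -- hroot : pvRootsTo p g2 (pyGetD p (pyGetD p a 0) 0) r
        have hgrbd := hB.2 _ hpabd.1 hpabd.2
        have hpres := pvHalvePres hB ha0 han hpa
        have hB' : pvBounds n (PySem.List.pySetD p a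
            (PySem.List.pyGetD p (PySem.List.pyGetD p a 0) 0)) :=
          pvBounds_setD hB ha0 han hgrbd.1 hgrbd.2
        have hroot' := hpres g2 _ r hgrbd.1 hgrbd.2 hroot
        obtain ⟨p'', heq, hB'', hpres''⟩ :=
          ih g2 (by omega) f _ _ r hB' hgrbd.1 hgrbd.2 hroot' (by omega)
        refine ⟨p'', ?_, hB'', ?_⟩
        · simp only [pvFind, hpa, if_false]
          exact heq
        · intro g' b r' hb0 hbn h
          exact hpres'' g' b r' hb0 hbn (hpres g' b r' hb0 hbn h)

lemma pvFind_neg {n : Nat} {p : List Int} {a : Int} (hB : pvBounds n p)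
    (h1 : -(n : Int) ≤ a) (h2 : a < 0) (f : Nat) :
    pvFind (f + 1) p a = pvFind (f + 1) p (a + n) := by
  have hlen : (p.length : Int) = (n : Int) := by exact_mod_cast congrArg Nat.cast hB.1
  have hsh : ∀ d : Int, PySem.List.pyGetD p a d = PySem.List.pyGetD p (a + n) d := by
    intro d
    have := pvGetD_neg_shift p a d (by omega) h2
    rwa [hlen] at this
  have hx0 : 0 ≤ a + n := by omega
  have hxn : a + (n : Int) < (n : Int) := by omega
  have hpa0 : 0 ≤ PySem.List.pyGetD p (a + n) 0 := (hB.2 _ hx0 hxn).1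
  have hne : PySem.List.pyGetD p a 0 ≠ a := by rw [hsh]; omega
  simp only [pvFind, hne, if_false]
  rw [hsh]
  by_cases hroot : PySem.List.pyGetD p (a + n) 0 = a + n
  · -- write is a no-op, both sides return (p, a + n)
    have hval : PySem.List.pyGetD p (PySem.List.pyGetD p (a + n) 0) 0 = a + n := by
      rw [hroot, hroot]
    have hset : PySem.List.pySetD p a (PySem.List.pyGetD p (PySem.List.pyGetD p (a + n) 0) 0) = p := by
      rw [hval, pvSetD_neg_shift p a _ (by omega) h2, hlen]
      exact pvSet_getD_same p (a + n) (a + n) hx0 (by omega) hroot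
    rw [hset, hval, hroot, if_pos rfl, pvFind_root hroot]
  · simp only [hroot, if_false]
    rw [pvSetD_neg_shift p a _ (by omega) h2, hlen]


-- pure parent-chasing (no compression): the specification root function
def pvRootD (p : List Int) : Nat → Int → Int
  | 0, a => a
  | f+1, a => if PySem.List.pyGetD p a 0 = a then a else pvRootD p f (PySem.List.pyGetD p a 0)

lemma pvRootD_eq {p : List Int} : ∀ {g f : Nat} {a r : Int},
    pvRootsTo p g a r → g < f → pvRootD p f a = r := by
  intro g
  induction g with
  | zero =>
    intro f a r h hf
    obtain ⟨ha, rfl⟩ := h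
    obtain ⟨f, rfl⟩ : ∃ f', f = f' + 1 := ⟨f - 1, by omega⟩
    simp [pvRootD, ha]
  | succ g ih =>
    intro f a r h hf
    obtain ⟨f, rfl⟩ : ∃ f', f = f' + 1 := ⟨f - 1, by omega⟩
    simp only [pvRootsTo] at h
    by_cases ha : PySem.List.pyGetD p a 0 = a
    · simp only [ha, if_true] at h
      subst h
      simp [pvRootD, ha]
    · simp only [ha, if_false] at h
      simp only [pvRootD, ha, if_false]
      exact ih h (by omega)

def pvNorm (n : Nat) (x : Int) : Int := if x < 0 then x + n else x

lemma pvNorm_bounds {n : Nat} {x : Int} (h1 : -(n : Int) ≤ x) (h2 : x < (n : Int)) :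
    0 ≤ pvNorm n x ∧ pvNorm n x < (n : Int) := by
  unfold pvNorm
  split <;> omega

lemma pvUnionPres {n : Nat} {p2 : List Int} {u v : Int} (hB : pvBounds n p2)
    (hu0 : 0 ≤ u) (hun : u < (n : Int)) (hur : PySem.List.pyGetD p2 u 0 = u)
    (hv0 : 0 ≤ v) (hvn : v < (n : Int)) (hvr : PySem.List.pyGetD p2 v 0 = v)
    (huv : u ≠ v) :
    ∀ g' : Nat, ∀ b r' : Int, 0 ≤ b → b < (n : Int) → pvRootsTo p2 g' b r' →
      pvRootsTo (PySem.List.pySetD p2 v u) (g' + 1) b (if r' = v then u else r') := by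
  have hlen : (p2.length : Int) = (n : Int) := by exact_mod_cast congrArg Nat.cast hB.1
  have hget : ∀ x : Int, 0 ≤ x →
      PySem.List.pyGetD (PySem.List.pySetD p2 v u) x 0
        = if x = v then u else PySem.List.pyGetD p2 x 0 := by
    intro x hx
    exact pvGetD_setD p2 v u x 0 hv0 (by omega) hx
  intro g'
  induction g' with
  | zero =>
    intro b r' hb0 hbn h
    obtain ⟨hb, rfl⟩ := h
    by_cases hbv : b = v
    · have h1 : PySem.List.pyGetD (PySem.List.pySetD p2 v u) b 0 = u := by
        rw [hget b hb0, if_pos hbv]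
      have h2 : PySem.List.pyGetD (PySem.List.pySetD p2 v u) u 0 = u := by
        rw [hget u hu0, if_neg huv, hur]
      have hub : ¬ (u = b) := fun he => huv (by rw [he, hbv])
      rw [if_pos hbv]
      simp only [pvRootsTo, h1, hub, if_false]
      exact ⟨h2, trivial⟩
    · have h1 : PySem.List.pyGetD (PySem.List.pySetD p2 v u) b 0 = b := by
        rw [hget b hb0, if_neg hbv]; exact hb
      rw [if_neg hbv]
      exact pvRootsTo_root h1 _
  | succ g'' ih =>
    intro b r' hb0 hbn h
    by_cases hbroot : PySem.List.pyGetD p2 b 0 = b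
    · have hr : r' = b := pvRootsTo_det hbroot h
      rw [hr]
      exact pvRootsTo_mono (ih b b hb0 hbn (pvRootsTo_root hbroot g'')) (by omega)
    · simp only [pvRootsTo, hbroot, if_false] at h
      have hbv : b ≠ v := fun he => hbroot (by rw [he]; exact he ▸ hvr)
      have h1 : PySem.List.pyGetD (PySem.List.pySetD p2 v u) b 0 = PySem.List.pyGetD p2 b 0 := by
        rw [hget b hb0, if_neg hbv]
      have hpbbd := hB.2 b hb0 hbn
      have hb' : PySem.List.pyGetD (PySem.List.pySetD p2 v u) b 0 ≠ b := by rw [h1]; exact hbroot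
      simp only [pvRootsTo, hb', if_false]
      rw [h1]
      exact ih _ r' hpbbd.1 hpbbd.2 h

lemma pvUnion_spec {n : Nat} {p sz : List Int} {c : Int} {G F : Nat} {a b : Int}
    (hB : pvBounds n p) (hR : pvReach n p G) (hGF : G < F)
    (ha1 : -(n : Int) ≤ a) (ha2 : a < (n : Int)) (hb1 : -(n : Int) ≤ b) (hb2 : b < (n : Int)) :
    ∃ p' sz' c' ra rb ρ,
      pvUnion F p sz c a b = (p', sz', c') ∧ pvBounds n p' ∧
      pvRootsTo p G (pvNorm n a) ra ∧ pvRootsTo p G (pvNorm n b) rb ∧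
      (ρ = ra ∨ ρ = rb) ∧
      (∀ g' b0 r', 0 ≤ b0 → b0 < (n : Int) → pvRootsTo p g' b0 r' →
        pvRootsTo p' (g' + 1) b0 (if r' = ra ∨ r' = rb then ρ else r')) := by
  obtain ⟨F, rfl⟩ : ∃ F', F = F' + 1 := ⟨F - 1, by omega⟩
  have hna := pvNorm_bounds ha1 ha2
  have hnb := pvNorm_bounds hb1 hb2
  obtain ⟨ra, hra⟩ := hR _ hna.1 hna.2
  obtain ⟨p1, heq1, hB1, pres1⟩ := pvFind_spec G (F + 1) p _ ra hB hna.1 hna.2 hra hGF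
  have heq1' : pvFind (F + 1) p a = (p1, ra) := by
    unfold pvNorm at heq1
    by_cases hneg : a < 0
    · rw [pvFind_neg hB ha1 hneg F]
      simpa [hneg] using heq1
    · simpa [hneg] using heq1
  obtain ⟨rb, hrb⟩ := hR _ hnb.1 hnb.2
  have hrb1 : pvRootsTo p1 G (pvNorm n b) rb := pres1 G _ rb hnb.1 hnb.2 hrb
  obtain ⟨p2, heq2, hB2, pres2⟩ := pvFind_spec G (F + 1) p1 _ rb hB1 hnb.1 hnb.2 hrb1 hGF
  have hlen1 : (p1.length : Int) = (n : Int) := by exact_mod_cast congrArg Nat.cast hB1.1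
  have heq2' : pvFind (F + 1) p1 b = (p2, rb) := by
    unfold pvNorm at heq2
    by_cases hneg : b < 0
    · rw [pvFind_neg hB1 (by omega) hneg F]
      simpa [hneg] using heq2
    · simpa [hneg] using heq2
  have hrabd := pvRootsTo_bounds hB hna.1 hna.2 hra
  have hrbbd := pvRootsTo_bounds hB1 hnb.1 hnb.2 hrb1
  -- transport roots to p2
  have hrap2 : pvRootsTo p2 G _ ra := pres2 G _ ra hna.1 hna.2 (pres1 G _ ra hna.1 hna.2 hra)
  have hrbp2 : pvRootsTo p2 G _ rb := pres2 G _ rb hnb.1 hnb.2 hrb1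
  have hrabd2 := pvRootsTo_bounds hB2 hna.1 hna.2 hrap2
  have hrbbd2 := pvRootsTo_bounds hB2 hnb.1 hnb.2 hrbp2
  have hrar : PySem.List.pyGetD p2 ra 0 = ra := hrabd2.2.2
  have hrbr : PySem.List.pyGetD p2 rb 0 = rb := hrbbd2.2.2
  by_cases hcase : ra = rb
  · refine ⟨p2, sz, c, ra, rb, ra, ?_, hB2, hra, hrb, Or.inl rfl, ?_⟩
    · unfold pvUnion
      simp [heq1', heq2', hcase]
    · intro g' b0 r' hb00 hb0n h
      have h2 : pvRootsTo p2 g' b0 r' := pres2 g' b0 r' hb00 hb0n (pres1 g' b0 r' hb00 hb0n h)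
      by_cases hrr : r' = ra ∨ r' = rb
      · have : r' = ra := by rcases hrr with h | h; exact h; rw [h, hcase]
        rw [if_pos hrr, ← this]
        exact pvRootsTo_mono h2 (by omega)
      · rw [if_neg hrr]
        exact pvRootsTo_mono h2 (by omega)
  · -- real union
    by_cases hsz : PySem.List.pyGetD sz ra 0 < PySem.List.pyGetD sz rb 0
    · -- u = rb, v = ra
      have hpres := pvUnionPres hB2 hrbbd2.1 hrbbd2.2.1 hrbr hrabd2.1 hrabd2.2.1 hrar
        (fun he => hcase he.symm)
      refine ⟨PySem.List.pySetD p2 ra rb,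
        PySem.List.pySetD sz rb (PySem.List.pyGetD sz rb 0 + PySem.List.pyGetD sz ra 0), c - 1,
        ra, rb, rb, ?_, ?_, hra, hrb, Or.inr rfl, ?_⟩
      · unfold pvUnion
        simp [heq1', heq2', hcase, hsz]
      · exact pvBounds_setD hB2 hrabd2.1 hrabd2.2.1 hrbbd2.1 hrbbd2.2.1
      · intro g' b0 r' hb00 hb0n h
        have h2 : pvRootsTo p2 g' b0 r' := pres2 g' b0 r' hb00 hb0n (pres1 g' b0 r' hb00 hb0n h)
        have := hpres g' b0 r' hb00 hb0n h2
        by_cases hrv : r' = ra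
        · rw [if_pos hrv] at this
          rw [if_pos (Or.inl hrv)]
          exact this
        · rw [if_neg hrv] at this
          by_cases hru : r' = rb
          · rw [if_pos (Or.inr hru)]
            rw [hru] at this
            exact this
          · rw [if_neg (by tauto)]
            exact this
    · -- u = ra, v = rb
      have hpres := pvUnionPres hB2 hrabd2.1 hrabd2.2.1 hrar hrbbd2.1 hrbbd2.2.1 hrbr hcase
      refine ⟨PySem.List.pySetD p2 rb ra,
        PySem.List.pySetD sz ra (PySem.List.pyGetD sz ra 0 + PySem.List.pyGetD sz rb 0), c - 1,
        ra, rb, ra, ?_, ?_, hra, hrb, Or.inl rfl, ?_⟩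
      · unfold pvUnion
        simp [heq1', heq2', hcase, hsz]
      · exact pvBounds_setD hB2 hrbbd2.1 hrbbd2.2.1 hrabd2.1 hrabd2.2.1
      · intro g' b0 r' hb00 hb0n h
        have h2 : pvRootsTo p2 g' b0 r' := pres2 g' b0 r' hb00 hb0n (pres1 g' b0 r' hb00 hb0n h)
        have := hpres g' b0 r' hb00 hb0n h2
        by_cases hrv : r' = rb
        · rw [if_pos hrv] at this
          rw [if_pos (Or.inr hrv)]
          exact this
        · rw [if_neg hrv] at this
          by_cases hru : r' = ra
          · rw [if_pos (Or.inl hru)]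
            rw [hru] at this
            exact this
          · rw [if_neg (by tauto)]
            exact this


lemma pvGetD_map (f : Int → Int) (L : List Int) (x : Int) (hx0 : 0 ≤ x) (hxn : x < (L.length : Int)) :
    PySem.List.pyGetD (L.map f) x 0 = f (PySem.List.pyGetD L x 0) := by
  have h2 : x < ((L.map f).length : Int) := by simpa using hxn
  rw [PySem.List.pyGetD_eq_getElem _ _ hx0 h2, PySem.List.pyGetD_eq_getElem _ _ hx0 hxn]
  simp

lemma pvStep_spec {n : Nat} {edges : List (Int × Int × Int)} {F : Nat}
    {p sz L : List Int} {c : Int} {G : Nat} {idx : Int}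
    (hB : pvBounds n p) (hR : pvReach n p G) (hL : L.length = n) (hRel : pvRel n p L)
    (hGF : G < F)
    (hi1 : -(n : Int) ≤ (PySem.List.pyGetD edges idx (0, 0, 0)).2.1)
    (hi2 : (PySem.List.pyGetD edges idx (0, 0, 0)).2.1 < (n : Int))
    (hj1 : -(n : Int) ≤ (PySem.List.pyGetD edges idx (0, 0, 0)).2.2)
    (hj2 : (PySem.List.pyGetD edges idx (0, 0, 0)).2.2 < (n : Int)) :
    ∃ p' sz' c', pvStepA edges F (p, sz, c) idx = (p', sz', c') ∧
      pvBounds n p' ∧ pvReach n p' (G + 1) ∧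
      (pvStepB edges L idx).length = n ∧ pvRel n p' (pvStepB edges L idx) := by
  have hlenL : (L.length : Int) = (n : Int) := by exact_mod_cast congrArg Nat.cast hL
  obtain ⟨p', sz', c', ra, rb, ρ, hequ, hB', hra, hrb, hρ, pres⟩ :=
    pvUnion_spec (sz := sz) (c := c) hB hR hGF hi1 hi2 hj1 hj2
  have hna := pvNorm_bounds hi1 hi2
  have hnb := pvNorm_bounds hj1 hj2
  -- the two labels read by B
  have hgi : PySem.List.pyGetD L (PySem.List.pyGetD edges idx (0, 0, 0)).2.1 0
      = PySem.List.pyGetD L (pvNorm n (PySem.List.pyGetD edges idx (0, 0, 0)).2.1) 0 := by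
    unfold pvNorm
    by_cases hneg : (PySem.List.pyGetD edges idx (0, 0, 0)).2.1 < 0
    · rw [pvGetD_neg_shift L _ 0 (by omega) hneg, hlenL, if_pos hneg]
    · rw [if_neg hneg]
  have hgj : PySem.List.pyGetD L (PySem.List.pyGetD edges idx (0, 0, 0)).2.2 0
      = PySem.List.pyGetD L (pvNorm n (PySem.List.pyGetD edges idx (0, 0, 0)).2.2) 0 := by
    unfold pvNorm
    by_cases hneg : (PySem.List.pyGetD edges idx (0, 0, 0)).2.2 < 0
    · rw [pvGetD_neg_shift L _ 0 (by omega) hneg, hlenL, if_pos hneg]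
    · rw [if_neg hneg]
  -- notation
  set i' := pvNorm n (PySem.List.pyGetD edges idx (0, 0, 0)).2.1 with hi'
  set j' := pvNorm n (PySem.List.pyGetD edges idx (0, 0, 0)).2.2 with hj'
  set li := PySem.List.pyGetD L i' 0 with hli
  set lj := PySem.List.pyGetD L j' 0 with hlj
  -- root-to-label dictionary facts
  have hkey : ∀ x rx : Int, ∀ gx : Nat, 0 ≤ x → x < (n : Int) → pvRootsTo p gx x rx →
      ((rx = ra ↔ PySem.List.pyGetD L x 0 = li) ∧ (rx = rb ↔ PySem.List.pyGetD L x 0 = lj)) := by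
    intro x rx gx hx0 hxn hrx
    exact ⟨hRel x i' rx ra gx G hx0 hxn hna.1 hna.2 hrx hra,
           hRel x j' rx rb gx G hx0 hxn hnb.1 hnb.2 hrx hrb⟩
  have hiff : ra = rb ↔ li = lj := hkey i' ra G hna.1 hna.2 hra |>.2
  -- the new root of x in p' is determined by its old root
  have hnewroot : ∀ x rx' : Int, ∀ gx : Nat, 0 ≤ x → x < (n : Int) → pvRootsTo p' gx x rx' →
      ∃ rx, pvRootsTo p G x rx ∧ rx' = (if rx = ra ∨ rx = rb then ρ else rx) := by
    intro x rx' gx hx0 hxn hrx'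
    obtain ⟨rx, hrx⟩ := hR x hx0 hxn
    refine ⟨rx, hrx, ?_⟩
    exact pvRootsTo_unique hrx' (pres G x rx hx0 hxn hrx)
  refine ⟨p', sz', c', ?_, hB', ?_, ?_, ?_⟩
  · unfold pvStepA
    exact hequ
  · intro x hx0 hxn
    obtain ⟨rx, hrx⟩ := hR x hx0 hxn
    exact ⟨_, pres G x rx hx0 hxn hrx⟩
  · simp only [pvStepB]
    split <;> simp [hL]
  · -- the relation
    have hstep : pvStepB edges L idx =
        if PySem.List.pyGetD L (PySem.List.pyGetD edges idx (0, 0, 0)).2.1 0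
            ≠ PySem.List.pyGetD L (PySem.List.pyGetD edges idx (0, 0, 0)).2.2 0 then
          L.map (fun l => if l = PySem.List.pyGetD L (PySem.List.pyGetD edges idx (0, 0, 0)).2.2 0
            then PySem.List.pyGetD L (PySem.List.pyGetD edges idx (0, 0, 0)).2.1 0 else l)
        else L := rfl
    rw [hstep, hgi, hgj]
    by_cases hll : li = lj
    · rw [if_neg (by simpa using hll)]
      have hrarb : ra = rb := hiff.mpr hll
      have hρa : ρ = ra := by
        rcases hρ with h | h
        · exact h
        · rw [h, hrarb]
      intro x y rx' ry' gx gy hx0 hxn hy0 hyn hrx' hry'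
      obtain ⟨rx, hrx, hrxeq⟩ := hnewroot x rx' gx hx0 hxn hrx'
      obtain ⟨ry, hry, hryeq⟩ := hnewroot y ry' gy hy0 hyn hry'
      have hold := hRel x y rx ry G G hx0 hxn hy0 hyn hrx hry
      have hmx : rx' = rx := by
        rw [hrxeq]
        by_cases h : rx = ra ∨ rx = rb
        · rw [if_pos h, hρa]
          rcases h with h | h
          · rw [h]
          · rw [h, hrarb]
        · rw [if_neg h]
      have hmy : ry' = ry := by
        rw [hryeq]
        by_cases h : ry = ra ∨ ry = rb
        · rw [if_pos h, hρa]
          rcases h with h | h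
          · rw [h]
          · rw [h, hrarb]
        · rw [if_neg h]
      rw [hmx, hmy]
      exact hold
    · rw [if_pos (by simpa using hll)]
      have hrarb : ra ≠ rb := fun h => hll (hiff.mp h)
      intro x y rx' ry' gx gy hx0 hxn hy0 hyn hrx' hry'
      obtain ⟨rx, hrx, hrxeq⟩ := hnewroot x rx' gx hx0 hxn hrx'
      obtain ⟨ry, hry, hryeq⟩ := hnewroot y ry' gy hy0 hyn hry'
      have hold := hRel x y rx ry G G hx0 hxn hy0 hyn hrx hry
      have hka := hkey x rx G hx0 hxn hrx
      have hkb := hkey y ry G hy0 hyn hry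
      have hLx : PySem.List.pyGetD
          (L.map (fun l => if l = lj then li else l)) x 0
          = if PySem.List.pyGetD L x 0 = lj then li else PySem.List.pyGetD L x 0 :=
        pvGetD_map _ L x hx0 (by omega)
      have hLy : PySem.List.pyGetD
          (L.map (fun l => if l = lj then li else l)) y 0
          = if PySem.List.pyGetD L y 0 = lj then li else PySem.List.pyGetD L y 0 :=
        pvGetD_map _ L y hy0 (by omega)
      rw [hrxeq, hryeq, hLx, hLy]
      by_cases h1 : rx = ra ∨ rx = rb
      · have vx : (if PySem.List.pyGetD L x 0 = lj then li else PySem.List.pyGetD L x 0) = li := by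
          rcases h1 with h | h
          · have hx := hka.1.mp h
            rw [if_neg (by rw [hx]; exact hll), hx]
          · rw [if_pos (hka.2.mp h)]
        by_cases h2 : ry = ra ∨ ry = rb
        · have vy : (if PySem.List.pyGetD L y 0 = lj then li else PySem.List.pyGetD L y 0) = li := by
            rcases h2 with h | h
            · have hy := hkb.1.mp h
              rw [if_neg (by rw [hy]; exact hll), hy]
            · rw [if_pos (hkb.2.mp h)]
          rw [if_pos h1, if_pos h2, vx, vy]
          simp
        · push_neg at h2
          have hρy : ρ ≠ ry := by
            rcases hρ with h | h
            · rw [h]; exact fun he => h2.1 he.symm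
            · rw [h]; exact fun he => h2.2 he.symm
          have hLyne : (if PySem.List.pyGetD L y 0 = lj then li else PySem.List.pyGetD L y 0)
              = PySem.List.pyGetD L y 0 := by
            rw [if_neg (fun he => h2.2 (hkb.2.mpr he))]
          rw [if_pos h1, if_neg (by push_neg; exact h2), vx, hLyne]
          constructor
          · intro he
            exact absurd he hρy
          · intro he
            exact absurd he.symm (fun hh => h2.1 (hkb.1.mpr hh))
      · push_neg at h1
        have hLxne : (if PySem.List.pyGetD L x 0 = lj then li else PySem.List.pyGetD L x 0)
            = PySem.List.pyGetD L x 0 := by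
          rw [if_neg (fun he => h1.2 (hka.2.mpr he))]
        by_cases h2 : ry = ra ∨ ry = rb
        · have vy : (if PySem.List.pyGetD L y 0 = lj then li else PySem.List.pyGetD L y 0) = li := by
            rcases h2 with h | h
            · have hy := hkb.1.mp h
              rw [if_neg (by rw [hy]; exact hll), hy]
            · rw [if_pos (hkb.2.mp h)]
          have hρx : ρ ≠ rx := by
            rcases hρ with h | h
            · rw [h]; exact fun he => h1.1 he.symm
            · rw [h]; exact fun he => h1.2 he.symm
          rw [if_neg (by push_neg; exact h1), if_pos h2, vy, hLxne]
          constructor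
          · intro he
            exact absurd he.symm hρx
          · intro he
            exact absurd he (fun hh => h1.1 (hka.1.mpr hh))
        · push_neg at h2
          have hLyne : (if PySem.List.pyGetD L y 0 = lj then li else PySem.List.pyGetD L y 0)
              = PySem.List.pyGetD L y 0 := by
            rw [if_neg (fun he => h2.2 (hkb.2.mpr he))]
          rw [if_neg (by push_neg; exact h1), if_neg (by push_neg; exact h2), hLxne, hLyne]
          exact hold


lemma pvLoop_spec {n : Nat} {edges : List (Int × Int × Int)} {F : Nat} :
    ∀ (is : List Int) (p sz L : List Int) (c : Int) (G : Nat),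
    pvBounds n p → pvReach n p G → L.length = n → pvRel n p L →
    G + is.length < F →
    (∀ idx ∈ is,
      -(n : Int) ≤ (PySem.List.pyGetD edges idx (0, 0, 0)).2.1 ∧
      (PySem.List.pyGetD edges idx (0, 0, 0)).2.1 < (n : Int) ∧
      -(n : Int) ≤ (PySem.List.pyGetD edges idx (0, 0, 0)).2.2 ∧
      (PySem.List.pyGetD edges idx (0, 0, 0)).2.2 < (n : Int)) →
    pvBounds n (is.foldl (pvStepA edges F) (p, sz, c)).1 ∧
    pvReach n (is.foldl (pvStepA edges F) (p, sz, c)).1 (G + is.length) ∧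
    (is.foldl (pvStepB edges) L).length = n ∧
    pvRel n (is.foldl (pvStepA edges F) (p, sz, c)).1 (is.foldl (pvStepB edges) L) := by
  intro is
  induction is with
  | nil =>
    intro p sz L c G hB hR hL hRel _ _
    exact ⟨hB, by simpa using hR, hL, hRel⟩
  | cons i is ih =>
    intro p sz L c G hB hR hL hRel hGF hvalid
    obtain ⟨hv1, hv2, hv3, hv4⟩ := hvalid i (List.mem_cons_self ..)
    obtain ⟨p', sz', c', heq, hB', hR', hL', hRel'⟩ :=
      pvStep_spec (F := F) (sz := sz) (c := c) hB hR hL hRel (show G < F by simp at hGF; omega) hv1 hv2 hv3 hv4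
    have hfold : (i :: is).foldl (pvStepA edges F) (p, sz, c)
        = is.foldl (pvStepA edges F) (p', sz', c') := by
      rw [List.foldl_cons, heq]
    have hfoldB : (i :: is).foldl (pvStepB edges) L
        = is.foldl (pvStepB edges) (pvStepB edges L i) := by
      rw [List.foldl_cons]
    rw [hfold, hfoldB]
    have := ih p' sz' (pvStepB edges L i) c' (G + 1) hB' hR' hL' hRel'
      (by simp at hGF ⊢; omega)
      (fun idx hidx => hvalid idx (List.mem_cons_of_mem _ hidx))
    have hlen : G + 1 + is.length = G + (i :: is).length := by simp; omega
    rw [hlen] at this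
    exact this

lemma pvSizes_spec {n F : Nat} :
    ∀ (is : List Int) (p : List Int) (d : PySem.Dict Int Int) (G : Nat),
    pvBounds n p → pvReach n p G → G < F →
    (∀ i ∈ is, 0 ≤ i ∧ i < (n : Int)) →
    (is.foldl (pvStepSize F) (p, d)).2 =
      (is.map (pvRootD p F)).foldl (fun d k => d.insert k (d.getD k 0 + 1)) d := by
  intro is
  induction is with
  | nil => intro p d G _ _ _ _; rfl
  | cons i is ih =>
    intro p d G hB hR hGF hvalid
    obtain ⟨hv1, hv2⟩ := hvalid i (List.mem_cons_self ..)
    obtain ⟨r, hr⟩ := hR i hv1 hv2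
    obtain ⟨p1, heq, hB1, pres1⟩ := pvFind_spec G F p i r hB hv1 hv2 hr hGF
    have hstep : pvStepSize F (p, d) i = (p1, d.insert r (d.getD r 0 + 1)) := by
      unfold pvStepSize
      rw [heq]
    have hroot : pvRootD p F i = r := pvRootD_eq hr hGF
    have hmapeq : is.map (pvRootD p1 F) = is.map (pvRootD p F) := by
      apply List.map_congr_left
      intro i0 hi0
      obtain ⟨hv01, hv02⟩ := hvalid i0 (List.mem_cons_of_mem _ hi0)
      obtain ⟨r0, hr0⟩ := hR i0 hv01 hv02
      rw [pvRootD_eq hr0 hGF, pvRootD_eq (pres1 G i0 r0 hv01 hv02 hr0) hGF]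
    have hR1 : pvReach n p1 G := by
      intro x hx0 hxn
      obtain ⟨rx, hrx⟩ := hR x hx0 hxn
      exact ⟨rx, pres1 G x rx hx0 hxn hrx⟩
    rw [List.foldl_cons, hstep, ih p1 _ G hB1 hR1 hGF
      (fun i0 hi0 => hvalid i0 (List.mem_cons_of_mem _ hi0)), hmapeq]
    rw [List.map_cons, List.foldl_cons, hroot]


lemma pvCfold_eq_counter (l : List Int) :
    l.foldl (fun (d : PySem.Dict Int Int) k => d.insert k (d.getD k 0 + 1)) PySem.Dict.empty
      = PySem.Dict.counter l := rfl

lemma pvValues_getD : ∀ (items : List (Int × Int)), (items.map Prod.fst).Nodup →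
    (PySem.Dict.mk items).values
      = (items.map Prod.fst).map (fun k => (PySem.Dict.mk items).getD k 0) := by
  intro items
  induction items with
  | nil => intro _; rfl
  | cons kv rest ih =>
    intro hnd
    obtain ⟨k, v⟩ := kv
    simp only [List.map_cons] at hnd
    have hk : k ∉ rest.map Prod.fst := (List.nodup_cons.mp hnd).1
    have hnd' : (rest.map Prod.fst).Nodup := (List.nodup_cons.mp hnd).2
    have hhead : (PySem.Dict.mk ((k, v) :: rest)).getD k 0 = v := by
      simp [PySem.Dict.getD, PySem.Dict.get?_mk_cons]
    have htail : ∀ k' ∈ rest.map Prod.fst,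
        (PySem.Dict.mk ((k, v) :: rest)).getD k' 0 = (PySem.Dict.mk rest).getD k' 0 := by
      intro k' hk'
      have hne : (k == k') = false := by
        simp only [beq_eq_false_iff_ne, ne_eq]
        intro he
        exact hk (he ▸ hk')
      simp [PySem.Dict.getD, PySem.Dict.get?_mk_cons, hne]
    calc (PySem.Dict.mk ((k, v) :: rest)).values
        = v :: (PySem.Dict.mk rest).values := rfl
      _ = v :: (rest.map Prod.fst).map (fun k' => (PySem.Dict.mk rest).getD k' 0) := by
          rw [ih hnd']
      _ = _ := by
          simp only [List.map_cons, hhead]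
          congr 1
          exact (List.map_congr_left (fun k' hk' => (htail k' hk').symm))

lemma pvValues_counter (l : List Int) :
    (PySem.Dict.counter l).values
      = (PySem.Set.ofList l).map (fun v => ((l.count v : Nat) : Int)) := by
  have h1 : (PySem.Dict.counter l).values
      = (PySem.Dict.counter l).keys.map (fun k => (PySem.Dict.counter l).getD k 0) :=
    pvValues_getD (PySem.Dict.counter l).items (PySem.Dict.nodup_keys_counter l)
  rw [h1, PySem.Dict.keys_counter]
  exact List.map_congr_left (fun k _ => PySem.Dict.getD_counter l k)

lemma pvContains_add (s : List Int) (x y : Int) (h : PySem.Set.contains s x) :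
    PySem.Set.contains (PySem.Set.add s y) x := by
  unfold PySem.Set.add
  split
  · exact h
  · simp only [PySem.Set.contains] at h ⊢
    rw [List.contains_append, h, Bool.true_or]

lemma pvFoldAdd_filter (x : Int) : ∀ (l s : List Int), PySem.Set.contains s x →
    l.foldl PySem.Set.add s = (l.filter (fun y => y != x)).foldl PySem.Set.add s := by
  intro l
  induction l with
  | nil => intro s _; rfl
  | cons y l ih =>
    intro s hs
    by_cases hyx : y = x
    · have hfy : (y != x) = false := by simp [hyx]
      rw [List.filter_cons, hfy]
      simp only [Bool.false_eq_true, if_false, List.foldl_cons]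
      have hadd : PySem.Set.add s y = s := by
        unfold PySem.Set.add
        rw [if_pos (by rw [hyx]; exact hs)]
      rw [hadd]
      exact ih s hs
    · have hfy : (y != x) = true := by simp [hyx]
      rw [List.filter_cons, hfy]
      simp only [if_true, List.foldl_cons]
      exact ih (PySem.Set.add s y) (pvContains_add s x y hs)

lemma pvFoldAdd_cons_out (a : Int) : ∀ (l s : List Int), (∀ y ∈ l, y ≠ a) →
    l.foldl PySem.Set.add (a :: s) = a :: l.foldl PySem.Set.add s := by
  intro l
  induction l with
  | nil => intro s _; rfl
  | cons y l ih =>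
    intro s hl
    have hya : y ≠ a := hl y (List.mem_cons_self ..)
    have hcont : PySem.Set.contains (a :: s) y = PySem.Set.contains s y := by
      simp [PySem.Set.contains, hya]
    rw [List.foldl_cons, List.foldl_cons]
    by_cases hc : PySem.Set.contains s y
    · have h1 : PySem.Set.add (a :: s) y = a :: s := by
        unfold PySem.Set.add
        rw [if_pos (by rw [hcont]; exact hc)]
      have h2 : PySem.Set.add s y = s := by
        unfold PySem.Set.add
        rw [if_pos hc]
      rw [h1, h2]
      exact ih s (fun z hz => hl z (List.mem_cons_of_mem _ hz))
    · have h1 : PySem.Set.add (a :: s) y = a :: (s ++ [y]) := by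
        unfold PySem.Set.add
        rw [if_neg (by rw [hcont]; exact hc)]
        rfl
      have h2 : PySem.Set.add s y = s ++ [y] := by
        unfold PySem.Set.add
        rw [if_neg hc]
      rw [h1, h2]
      exact ih (s ++ [y]) (fun z hz => hl z (List.mem_cons_of_mem _ hz))

lemma pvOfList_cons (a : Int) (l : List Int) :
    PySem.Set.ofList (a :: l) = a :: PySem.Set.ofList (l.filter (fun y => y != a)) := by
  have h0 : PySem.Set.ofList (a :: l) = l.foldl PySem.Set.add [a] := rfl
  rw [h0, pvFoldAdd_filter a l [a] (by simp [PySem.Set.contains])]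
  have := pvFoldAdd_cons_out a (l.filter (fun y => y != a)) []
    (fun y hy => by simpa using (List.of_mem_filter hy))
  simpa using this


lemma pvCore : ∀ (N : Nat) (zs : List (Int × Int)), zs.length ≤ N →
    (∀ x ∈ zs, ∀ y ∈ zs, (x.1 = y.1 ↔ x.2 = y.2)) →
    (PySem.Set.ofList (zs.map Prod.fst)).map (fun v => (((zs.map Prod.fst).count v : Nat) : Int))
      = (PySem.Set.ofList (zs.map Prod.snd)).map (fun v => (((zs.map Prod.snd).count v : Nat) : Int)) := by
  intro N
  induction N with
  | zero =>
    intro zs h _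
    have : zs = [] := List.eq_nil_of_length_eq_zero (by omega)
    rw [this]
    rfl
  | succ N ih =>
    intro zs hlen hpat
    cases zs with
    | nil => rfl
    | cons z t =>
      obtain ⟨a, b⟩ := z
      have hzmem : (a, b) ∈ (a, b) :: t := List.mem_cons_self ..
      have hfeq : t.filter (fun q => q.1 != a) = t.filter (fun q => q.2 != b) := by
        apply List.filter_congr
        intro q hq
        have hiff := hpat q (List.mem_cons_of_mem _ hq) (a, b) hzmem
        by_cases h : q.1 = a
        · rw [h, hiff.mp h]
          show (a != a) = (b != b)
          simp
        · have h2 : q.2 ≠ b := fun hb => h (hiff.mpr hb)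
          have e1 : (q.1 != a) = true := by simpa using h
          have e2 : (q.2 != b) = true := by simpa using h2
          rw [e1, e2]
      have hLf : (t.map Prod.fst).filter (fun y => y != a)
          = (t.filter (fun q => q.1 != a)).map Prod.fst := by
        rw [List.filter_map]
        rfl
      have hRf : (t.map Prod.snd).filter (fun y => y != b)
          = (t.filter (fun q => q.1 != a)).map Prod.snd := by
        rw [List.filter_map, hfeq]
        rfl
      have hpat' : ∀ x ∈ t.filter (fun q => q.1 != a), ∀ y ∈ t.filter (fun q => q.1 != a),
          (x.1 = y.1 ↔ x.2 = y.2) := fun x hx y hy =>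
        hpat x (List.mem_cons_of_mem _ (List.mem_of_mem_filter hx))
          y (List.mem_cons_of_mem _ (List.mem_of_mem_filter hy))
      have hlen' : (t.filter (fun q => q.1 != a)).length ≤ N :=
        le_trans (List.length_filter_le _ _) (by simpa using hlen)
      have htails := ih (t.filter (fun q => q.1 != a)) hlen' hpat'
      have hc : (t.map Prod.fst).count a = (t.map Prod.snd).count b := by
        rw [List.count_eq_countP, List.count_eq_countP, List.countP_map, List.countP_map]
        apply List.countP_congr
        intro q hq
        have hiff := hpat q (List.mem_cons_of_mem _ hq) (a, b) hzmem
        constructor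
        · intro h
          simpa using hiff.mp (by simpa using h)
        · intro h
          simpa using hiff.mpr (by simpa using h)
      rw [List.map_cons, List.map_cons, pvOfList_cons, pvOfList_cons, hLf, hRf,
        List.map_cons, List.map_cons]
      congr 1
      · rw [List.count_cons_self, List.count_cons_self, hc]
      · -- switch the count functions to the filtered lists, then use the IH
        have hcntL : ∀ v ∈ PySem.Set.ofList ((t.filter (fun q => q.1 != a)).map Prod.fst),
            (a :: t.map Prod.fst).count v
              = ((t.filter (fun q => q.1 != a)).map Prod.fst).count v := by
          intro v hv
          have hvmem : v ∈ (t.filter (fun q => q.1 != a)).map Prod.fst :=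
            (PySem.Set.mem_ofList _ _).mp hv
          have hvne : v ≠ a := by
            obtain ⟨q, hq, rfl⟩ := List.mem_map.mp hvmem
            have := List.of_mem_filter hq
            simpa using this
          have h1 : (a :: t.map Prod.fst).count v = (t.map Prod.fst).count v := by
            simp [List.count_cons, hvne, Ne.symm hvne]
          rw [h1, ← hLf,
            List.count_filter (p := fun y => y != a) (by simpa using hvne)]
        have hcntR : ∀ v ∈ PySem.Set.ofList ((t.filter (fun q => q.1 != a)).map Prod.snd),
            (b :: t.map Prod.snd).count v
              = ((t.filter (fun q => q.1 != a)).map Prod.snd).count v := by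
          intro v hv
          have hvmem : v ∈ (t.filter (fun q => q.1 != a)).map Prod.snd :=
            (PySem.Set.mem_ofList _ _).mp hv
          have hvne : v ≠ b := by
            obtain ⟨q, hq, rfl⟩ := List.mem_map.mp hvmem
            rw [hfeq] at hq
            have := List.of_mem_filter hq
            simpa using this
          have h1 : (b :: t.map Prod.snd).count v = (t.map Prod.snd).count v := by
            simp [List.count_cons, hvne, Ne.symm hvne]
          rw [h1, ← hRf,
            List.count_filter (p := fun y => y != b) (by simpa using hvne)]
        calc (PySem.Set.ofList ((t.filter (fun q => q.1 != a)).map Prod.fst)).map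
              (fun v => (((a :: t.map Prod.fst).count v : Nat) : Int))
            = (PySem.Set.ofList ((t.filter (fun q => q.1 != a)).map Prod.fst)).map
              (fun v => ((((t.filter (fun q => q.1 != a)).map Prod.fst).count v : Nat) : Int)) :=
              List.map_congr_left (fun v hv => by rw [hcntL v hv])
          _ = (PySem.Set.ofList ((t.filter (fun q => q.1 != a)).map Prod.snd)).map
              (fun v => ((((t.filter (fun q => q.1 != a)).map Prod.snd).count v : Nat) : Int)) :=
              htails
          _ = (PySem.Set.ofList ((t.filter (fun q => q.1 != a)).map Prod.snd)).map
              (fun v => (((b :: t.map Prod.snd).count v : Nat) : Int)) :=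
              (List.map_congr_left (fun v hv => by rw [hcntR v hv])).symm


lemma pvPadProd (t : List Int) (h : t.length ≤ 3) :
    PySem.List.pyGetD (pvPad3 3 t) 0 0 * PySem.List.pyGetD (pvPad3 3 t) 1 0
        * PySem.List.pyGetD (pvPad3 3 t) 2 0
      = PySem.List.pyGetD (t ++ PySem.List.pyRepeat [(1 : Int)] (3 - (t.length : Int))) 0 0
        * PySem.List.pyGetD (t ++ PySem.List.pyRepeat [(1 : Int)] (3 - (t.length : Int))) 1 0
        * PySem.List.pyGetD (t ++ PySem.List.pyRepeat [(1 : Int)] (3 - (t.length : Int))) 2 0 := by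
  match t, h with
  | [], _ => simp [pvPad3, PySem.List.pyRepeat_singleton, PySem.List.pyGetD,
      PySem.List.pyGet?, PySem.List.pyIdx?]
  | [a], _ => simp [pvPad3, PySem.List.pyRepeat_singleton, PySem.List.pyGetD,
      PySem.List.pyGet?, PySem.List.pyIdx?]
  | [a, b], _ => simp [pvPad3, PySem.List.pyRepeat_singleton, PySem.List.pyGetD,
      PySem.List.pyGet?, PySem.List.pyIdx?]
  | [a, b, c], _ => simp [pvPad3, PySem.List.pyRepeat_singleton, PySem.List.pyGetD,
      PySem.List.pyGet?, PySem.List.pyIdx?]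

lemma pvMainEq (pts : List Int) (edges : List (Int × Int × Int)) (k : Int)
    (hPre : Pre_part1_multiply_top3_after_k_edges pts edges k) :
    part1_multiply_top3_after_k_edges pts edges k
      = part1_multiply_top3_after_k_edges_alt pts edges k := by
  unfold Pre_part1_multiply_top3_after_k_edges at hPre
  simp only [part1_multiply_top3_after_k_edges, part1_multiply_top3_after_k_edges_alt]
  set n := pts.length with hndef
  set E := edges.length with hEdef
  set F := n + E + 1 with hFdef
  set upto := min k (E : Int) with huptodef
  set is := PySem.List.pyRange 0 upto 1 with hisdef
  set p0 := PySem.List.pyRange 0 (n : Int) 1 with hp0def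
  set sz0 := PySem.List.pyRepeat [(1 : Int)] (n : Int) with hsz0def
  -- basic facts about the identity parent list
  have hup : upto ≤ (E : Int) := min_le_right _ _
  have hp0len : p0.length = n := by
    rw [hp0def, PySem.List.length_pyRange_one]; omega
  have hp0get : ∀ i : Int, 0 ≤ i → i < (n : Int) → PySem.List.pyGetD p0 i 0 = i := by
    intro i h1 h2
    have hlt : i < ((PySem.List.pyRange 0 (n : Int) 1).length : Int) := by
      rw [← hp0def, hp0len]; exact h2
    rw [hp0def, PySem.List.pyGetD_eq_getElem _ _ h1 hlt, PySem.List.getElem_pyRange_one]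
    omega
  have hB0 : pvBounds n p0 := by
    refine ⟨hp0len, ?_⟩
    intro i h1 h2
    rw [hp0get i h1 h2]
    exact ⟨h1, h2⟩
  have hR0 : pvReach n p0 0 := fun i h1 h2 => ⟨i, ⟨hp0get i h1 h2, rfl⟩⟩
  have hRel0 : pvRel n p0 p0 := by
    intro i j ri rj gi gj h1 h2 h3 h4 hri hrj
    rw [pvRootsTo_det (hp0get i h1 h2) hri, pvRootsTo_det (hp0get j h3 h4) hrj,
      hp0get i h1 h2, hp0get j h3 h4]
  -- the edges touched by the loop are exactly those Pre_ constrains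
  have hvalid : ∀ idx ∈ is,
      -(n : Int) ≤ (PySem.List.pyGetD edges idx (0, 0, 0)).2.1 ∧
      (PySem.List.pyGetD edges idx (0, 0, 0)).2.1 < (n : Int) ∧
      -(n : Int) ≤ (PySem.List.pyGetD edges idx (0, 0, 0)).2.2 ∧
      (PySem.List.pyGetD edges idx (0, 0, 0)).2.2 < (n : Int) := by
    intro idx hidx
    rw [hisdef, PySem.List.mem_pyRange_one] at hidx
    have hidxE : idx < (E : Int) := lt_of_lt_of_le hidx.2 hup
    have hidxE' : idx < (edges.length : Int) := by rw [← hEdef] at *; exact hidxE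
    have hgete : PySem.List.pyGetD edges idx (0, 0, 0) = edges[idx.toNat]'(by omega) :=
      PySem.List.pyGetD_eq_getElem edges _ hidx.1 hidxE'
    have hlt : idx.toNat < (edges.take upto.toNat).length := by
      rw [List.length_take]; omega
    have hmem := List.getElem_mem hlt
    rw [List.getElem_take] at hmem
    have := hPre _ hmem
    rw [hgete]
    exact ⟨this.1, this.2.1, this.2.2.1, this.2.2.2⟩
  have hislen : is.length ≤ E := by
    rw [hisdef, PySem.List.length_pyRange_one]; omega
  have hfuel : 0 + is.length < F := by omega
  obtain ⟨hBf, hRf, hLf, hRelf⟩ :=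
    pvLoop_spec (n := n) (edges := edges) (F := F) is p0 sz0 p0 (n : Int) 0
      hB0 hR0 hp0len hRel0 hfuel hvalid
  set stA := is.foldl (pvStepA edges F) (p0, sz0, (n : Int)) with hstAdef
  set Lf := is.foldl (pvStepB edges) p0 with hLfdef
  have hvalid2 : ∀ i ∈ p0, 0 ≤ i ∧ i < (n : Int) := by
    intro i hi
    rw [hp0def, PySem.List.mem_pyRange_one] at hi
    exact hi
  have hsizes := pvSizes_spec (n := n) (F := F) p0 stA.1 PySem.Dict.empty (0 + is.length)
    hBf hRf hfuel hvalid2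
  rw [hsizes, pvCfold_eq_counter, pvCfold_eq_counter]
  -- the two counters have the same values list
  have hvv : (PySem.Dict.counter (p0.map (pvRootD stA.1 F))).values
      = (PySem.Dict.counter Lf).values := by
    have hzfst : (p0.map (fun i => (pvRootD stA.1 F i, PySem.List.pyGetD Lf i 0))).map Prod.fst
        = p0.map (pvRootD stA.1 F) := by
      rw [List.map_map]
      rfl
    have hzsnd : (p0.map (fun i => (pvRootD stA.1 F i, PySem.List.pyGetD Lf i 0))).map Prod.snd
        = Lf := by
      rw [List.map_map]
      show p0.map (fun i => PySem.List.pyGetD Lf i 0) = Lf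
      have h1 : PySem.List.pyRange 0 (Lf.length : Int) 1 = p0 := by
        rw [hLf, hp0def]
      rw [← h1]
      exact PySem.List.map_pyGetD_pyRange_zero' Lf 0
    have hpatz : ∀ x ∈ p0.map (fun i => (pvRootD stA.1 F i, PySem.List.pyGetD Lf i 0)),
        ∀ y ∈ p0.map (fun i => (pvRootD stA.1 F i, PySem.List.pyGetD Lf i 0)),
        (x.1 = y.1 ↔ x.2 = y.2) := by
      intro x hx y hy
      obtain ⟨i, hi, rfl⟩ := List.mem_map.mp hx
      obtain ⟨j, hj, rfl⟩ := List.mem_map.mp hy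
      rw [hp0def, PySem.List.mem_pyRange_one] at hi hj
      obtain ⟨ri, hri⟩ := hRf i hi.1 hi.2
      obtain ⟨rj, hrj⟩ := hRf j hj.1 hj.2
      show (pvRootD stA.1 F i = pvRootD stA.1 F j ↔
        PySem.List.pyGetD Lf i 0 = PySem.List.pyGetD Lf j 0)
      rw [pvRootD_eq hri hfuel, pvRootD_eq hrj hfuel]
      exact hRelf i j ri rj (0 + is.length) (0 + is.length) hi.1 hi.2 hj.1 hj.2 hri hrj
    have hcore := pvCore _ _ le_rfl hpatz
    rw [hzfst, hzsnd] at hcore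
    rw [pvValues_counter, pvValues_counter]
    exact hcore
  rw [hvv]
  -- identical values lists: only the padding differs in form
  rw [PySem.List.slice_to _ (by norm_num)]
  exact pvPadProd _ (by simpa using List.length_take_le 3 _)

-- ===== VERDICT (by name: the statement is the Claim_ definition above) =====
theorem part1_multiply_top3_after_k_edges_spec : Claim_equal_part1_multiply_top3_after_k_edges := by
  intro pts edges_sorted k _hDom hPre
  show part1_multiply_top3_after_k_edges pts edges_sorted k
    = part1_multiply_top3_after_k_edges_alt pts edges_sorted k
  exact pvMainEq pts edges_sorted k hPre
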